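-- pv_equiv track=rewrite | github.com/zofialuther/CS8395-08-Paper1-updated | data/translated-code/pseudo-to-python/python/Align-columns.py | aligner
-- ===== SOURCE A (Python) =====
-- j2justifier = dict(L=str.ljust, R=str.rjust, C=str.center)
--
-- def aligner(infile, justification='L'):
--     assert justification in j2justifier, "justification can be L, R, or C; (Left, Right, or Centered)."
--     justifier = j2justifier[justification]
--
--     fieldsbyrow = []
--     for line in infile:
--         row = line.strip().split('$')
--         fieldsbyrow.append(row)
--
--     maxfields = 0
--     for fields in fieldsbyrow:
--         if len(fields) > maxfields:
--             maxfields = len(fields)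
--
--     for fields in fieldsbyrow:
--         for i in range(maxfields - len(fields)):
--             fields.append('')
--
--     fieldsbycolumn = []
--     for i in range(maxfields):
--         column = []
--         for row in fieldsbyrow:
--             column.append(row[i])
--         fieldsbycolumn.append(column)
--
--     colwidths = []
--     for column in fieldsbycolumn:
--         maxwidth = 0
--         for field in column:
--             if len(field) > maxwidth:
--                 maxwidth = len(field)
--         colwidths.append(maxwidth)
--
--     justifiedfields = []
--     for i in range(len(fieldsbycolumn)):
--         column = fieldsbycolumn[i]
--         justifiedcolumn = []
--         for j in range(len(column)):
--             justifiedcolumn.append(justifier(column[j], colwidths[i]))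
--         justifiedfields.append(justifiedcolumn)
--
--     justifiedrows = []
--     for i in range(len(justifiedfields[0])):
--         row = ''
--         for j in range(len(justifiedfields)):
--             row += justifiedfields[j][i] + ' '
--         justifiedrows.append(row)
--
--     return "\n".join(justifiedrows)
-- ===== SOURCE B (Python) =====
-- def aligner(infile, justification='L'):
--     assert justification in ('L', 'R', 'C'), "justification can be L, R, or C; (Left, Right, or Centered)."
--     justify = {'L': str.ljust, 'R': str.rjust, 'C': str.center}[justification]
--
--     rows = []
--     widths = []          # running per-column maxima, grown in place as wider rows appear
--     for line in infile:
--         row = line.strip().split('$')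
--         rows.append(row)
--         for i, field in enumerate(row):
--             if i < len(widths):
--                 if len(field) > widths[i]:
--                     widths[i] = len(field)
--             else:
--                 widths.append(len(field))
--
--     return '\n'.join(
--         ''.join(justify(field, w) + ' '
--                 for field, w in zip(row + [''] * (len(widths) - len(row)), widths))
--         for row in rows)
-- ===== Notes on version B (the rewrite author's own statement) =====
-- stated objective: simpler
-- what changed: B keeps a single running per-column-width accumulator merged row by row while reading the input once, then emits each line by zipping the row (padded with '') against that width list, instead of A's staged pipeline that pads all rows, builds a column-major transpose, a width list and a full table of justified columns before reassembling rows.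
import Mathlib
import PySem

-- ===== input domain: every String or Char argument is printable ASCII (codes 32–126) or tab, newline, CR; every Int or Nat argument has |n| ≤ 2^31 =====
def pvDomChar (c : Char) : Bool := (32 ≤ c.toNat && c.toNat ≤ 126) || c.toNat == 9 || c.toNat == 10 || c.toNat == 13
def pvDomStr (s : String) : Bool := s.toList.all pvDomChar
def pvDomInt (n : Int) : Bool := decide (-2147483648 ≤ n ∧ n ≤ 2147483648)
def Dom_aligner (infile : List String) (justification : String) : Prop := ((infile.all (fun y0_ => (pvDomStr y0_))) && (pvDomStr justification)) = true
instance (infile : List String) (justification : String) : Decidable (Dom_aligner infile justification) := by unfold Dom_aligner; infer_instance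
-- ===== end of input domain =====

-- B reads the input once, merging each row into one running per-column-width accumulator,
-- then emits each line by zipping the padded row with that width list — no transpose, no
-- padded row table, no justified-column table; same return value on Pre_.

-- str.ljust / str.rjust / str.center on List Char (exact: CPython pads with ' ';
-- center's extra space goes left exactly when the margin and the width are both odd).
def pyLjust (cs : List Char) (w : Nat) : List Char := cs ++ List.replicate (w - cs.length) ' '
def pyRjust (cs : List Char) (w : Nat) : List Char := List.replicate (w - cs.length) ' ' ++ cs
def pyCenter (cs : List Char) (w : Nat) : List Char :=
  let m := w - cs.length
  let left := m / 2 + (if m % 2 = 1 ∧ w % 2 = 1 then 1 else 0)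
  List.replicate left ' ' ++ cs ++ List.replicate (m - left) ' '
-- j2justifier[justification] (both Pythons dispatch on the same three letters)
def pyJustify (justification : String) (cs : List Char) (w : Nat) : List Char :=
  if justification = "R" then pyRjust cs w
  else if justification = "C" then pyCenter cs w
  else pyLjust cs w

-- ===== PORT A =====
-- row[i] / justifiedfields[j][i] are ported with .getD (indexes are in range on Pre_;
-- justifiedfields[0] is exactly where A raises IndexError on empty input, excluded by Pre_).
def aligner (infile : List String) (justification : String) : String :=
  let fieldsbyrow : List (List (List Char)) :=
    infile.foldl (fun acc line => acc ++ [PySem.Chars.splitOn (PySem.Chars.strip line.toList) ['$']]) []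
  let maxfields : Nat :=
    fieldsbyrow.foldl (fun m fields => if fields.length > m then fields.length else m) 0
  let fieldsbyrow : List (List (List Char)) :=
    fieldsbyrow.map (fun fields =>
      (List.range (maxfields - fields.length)).foldl (fun fs _ => fs ++ [([] : List Char)]) fields)
  let fieldsbycolumn : List (List (List Char)) :=
    (List.range maxfields).foldl (fun acc i =>
      acc ++ [fieldsbyrow.foldl (fun col row => col ++ [row.getD i []]) []]) []
  let colwidths : List Nat :=
    fieldsbycolumn.foldl (fun acc column =>
      acc ++ [column.foldl (fun m f => if f.length > m then f.length else m) 0]) []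
  let justifiedfields : List (List (List Char)) :=
    (List.range fieldsbycolumn.length).foldl (fun acc i =>
      acc ++ [(List.range (fieldsbycolumn.getD i []).length).foldl (fun jc j =>
        jc ++ [pyJustify justification ((fieldsbycolumn.getD i []).getD j []) (colwidths.getD i 0)]) []]) []
  let justifiedrows : List (List Char) :=
    (List.range (justifiedfields.getD 0 []).length).foldl (fun acc i =>
      acc ++ [(List.range justifiedfields.length).foldl (fun row j =>
        row ++ (justifiedfields.getD j []).getD i [] ++ [' ']) []]) []
  String.ofList (PySem.Chars.join ['\n'] justifiedrows)

-- ===== PORT B =====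
-- the inner 'for i, field in enumerate(row)' loop of Source B (widths[i] = len(field) is List.set)
def mergeRow : List Nat → Nat → List (List Char) → List Nat
  | w, _, [] => w
  | w, i, f :: rest =>
      if i < w.length then
        mergeRow (if f.length > w.getD i 0 then w.set i f.length else w) (i + 1) rest
      else
        mergeRow (w ++ [f.length]) (i + 1) rest

def aligner_alt (infile : List String) (justification : String) : String :=
  let st := infile.foldl (fun (st : List (List (List Char)) × List Nat) line =>
      let row := PySem.Chars.splitOn (PySem.Chars.strip line.toList) ['$']
      (st.1 ++ [row], mergeRow st.2 0 row)) ([], [])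
  let rows := st.1
  let widths := st.2
  String.ofList (PySem.Chars.join ['\n'] (rows.map (fun row =>
    PySem.Chars.join [] ((List.zip (row ++ List.replicate (widths.length - row.length) ([] : List Char)) widths).map
      (fun p => pyJustify justification p.1 p.2 ++ [' '])))))

-- ===== PRECONDITION & SPEC =====
-- Pre_ excludes exactly the inputs where the Python A raises: an empty infile (IndexError
-- at justifiedfields[0]) and a justification other than 'L'/'R'/'C' (AssertionError).
def Pre_aligner (infile : List String) (justification : String) : Prop :=
  infile ≠ [] ∧ (justification = "L" ∨ justification = "R" ∨ justification = "C")
instance (infile : List String) (justification : String) : Decidable (Pre_aligner infile justification) := by unfold Pre_aligner; infer_instance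
def pvWitness_aligner : List String × String := (["a$bb", "ccc"], "L")

def Spec_aligner (infile : List String) (justification : String) (out : String) : Prop := out = aligner_alt infile justification
instance (infile : List String) (justification : String) (out : String) : Decidable (Spec_aligner infile justification out) := by unfold Spec_aligner; infer_instance

-- ===== CLAIM (what is proved, stated in full; the proofs are below) =====
def Claim_equal_aligner : Prop := ∀ (infile : List String) (justification : String), Dom_aligner infile justification → Pre_aligner infile justification → Spec_aligner infile justification (aligner infile justification)

-- ===== LEMMAS AND PROOFS =====

-- the rows, the number of columns and the width of column j, common to both reductions
def pvRows (infile : List String) : List (List (List Char)) :=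
  infile.map (fun line => PySem.Chars.splitOn (PySem.Chars.strip line.toList) ['$'])
def pvN (rows : List (List (List Char))) : Nat := (rows.map List.length).foldl max 0
def pvW (rows : List (List (List Char))) (j : Nat) : Nat :=
  (rows.map (fun r => (r.getD j []).length)).foldl max 0
-- the common normal form of both outputs
def pvNorm (infile : List String) (justification : String) : String :=
  String.ofList (PySem.Chars.join ['\n'] ((pvRows infile).map (fun r =>
    ((List.range (pvN (pvRows infile))).map (fun j =>
      pyJustify justification (r.getD j []) (pvW (pvRows infile) j) ++ [' '])).flatten)))

lemma foldl_ifgt_key {α : Type} (f : α → Nat) (l : List α) (a : Nat) :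
    l.foldl (fun m x => if f x > m then f x else m) a = (l.map f).foldl max a := by
  induction l generalizing a with
  | nil => rfl
  | cons x t ih => simp only [List.map_cons, List.foldl_cons]; rw [ih]; congr 1; split <;> omega

lemma map_const_range {α : Type} (k : Nat) (d : α) :
    (List.range k).map (fun _ => d) = List.replicate k d := by
  induction k with
  | zero => rfl
  | succ m ih => rw [List.range_succ, List.map_append, ih, List.replicate_succ']; rfl

lemma getD_map_lt {α β : Type} (l : List α) (g : α → β) (i : Nat) (d : α) (d' : β) (h : i < l.length) :
    (l.map g).getD i d' = g (l.getD i d) := by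
  rw [List.getD_eq_getElem _ _ (by simpa using h), List.getD_eq_getElem _ _ h, List.getElem_map]

lemma getD_append_replicate {α : Type} (r : List α) (k i : Nat) (d : α) :
    (r ++ List.replicate k d).getD i d = r.getD i d := by
  rcases Nat.lt_or_ge i r.length with h | h
  · simp [List.getD, List.getElem?_append_left h]
  · rw [List.getD_eq_default _ _ h]
    rcases Nat.lt_or_ge i (r.length + k) with h2 | h2
    · rw [List.getD_eq_getElem]
      · rw [List.getElem_append_right h]
        simp
      · simpa using h2
    · rw [List.getD_eq_default]
      simpa using h2

lemma map_getD_range {α β : Type} (l : List α) (g : α → β) (d : α) :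
    (List.range l.length).map (fun t => g (l.getD t d)) = l.map g := by
  apply List.ext_getElem
  · simp
  · intro i h1 h2
    have h3 : i < l.length := by simpa using h2
    simp [List.getElem?_eq_getElem h3]

lemma join_nil_flatten (ps : List (List Char)) : PySem.Chars.join [] ps = ps.flatten := by
  unfold PySem.Chars.join
  induction ps with
  | nil => rfl
  | cons x t ih =>
    cases t with
    | nil => simp [List.intercalate]
    | cons y s =>
      have hstep : List.intersperse ([] : List Char) (x :: y :: s) = x :: [] :: List.intersperse [] (y :: s) := rfl
      simp only [List.intercalate, hstep, List.flatten_cons, List.nil_append] at ih ⊢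
      simp [ih]

lemma splitOn_go_ne_nil (sep : List Char) : ∀ (fuel : Nat) (l cur : List Char) (acc : List (List Char)),
    PySem.Chars.splitOn.go sep fuel l cur acc ≠ [] := by
  intro fuel
  induction fuel with
  | zero => intro l cur acc; simp [PySem.Chars.splitOn.go]
  | succ m ih =>
    intro l cur acc
    cases l with
    | nil => simp [PySem.Chars.splitOn.go]
    | cons c rest =>
      rw [PySem.Chars.splitOn.go]
      split
      · exact ih _ _ _
      · exact ih _ _ _

lemma splitOn_ne_nil (s sep : List Char) : PySem.Chars.splitOn s sep ≠ [] := by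
  unfold PySem.Chars.splitOn
  exact splitOn_go_ne_nil _ _ _ _ _

-- ---- B-side lemmas ----

-- characterization of the width-merge loop: result length and entries
lemma mergeRow_length (r : List (List Char)) : ∀ (w : List Nat) (i : Nat), i ≤ w.length →
    (mergeRow w i r).length = max w.length (i + r.length) := by
  induction r with
  | nil => intro w i h; simp [mergeRow]; omega
  | cons f rest ih =>
    intro w i h
    rw [mergeRow]
    by_cases hi : i < w.length
    · rw [if_pos hi]
      have hlen : (if f.length > w.getD i 0 then w.set i f.length else w).length = w.length := by
        split <;> simp
      rw [ih _ _ (by rw [hlen]; omega), hlen]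
      simp only [List.length_cons]
      omega
    · rw [if_neg hi]
      have hieq : i = w.length := by omega
      rw [ih _ _ (by simp; omega)]
      simp only [List.length_append, List.length_cons, List.length_nil, hieq]
      omega

lemma mergeRow_getD (r : List (List Char)) : ∀ (w : List Nat) (i : Nat), i ≤ w.length → ∀ j,
    (mergeRow w i r).getD j 0 =
      max (w.getD j 0) (if i ≤ j then (r.getD (j - i) []).length else 0) := by
  induction r with
  | nil =>
    intro w i h j
    simp [mergeRow]
  | cons f rest ih =>
    intro w i h j
    rw [mergeRow]
    have key : ∀ (w' : List Nat), w'.length = max w.length (i + 1) →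
        (∀ k, w'.getD k 0 = if k = i then max (w.getD i 0) f.length else w.getD k 0) →
        (mergeRow w' (i + 1) rest).getD j 0 =
          max (w.getD j 0) (if i ≤ j then ((f :: rest).getD (j - i) []).length else 0) := by
      intro w' hlen hget
      rw [ih _ _ (by omega) j, hget j]
      rcases Nat.lt_trichotomy j i with hj | hj | hj
      · rw [if_neg (by omega), if_neg (by omega), if_neg (by omega)]
      · subst hj
        rw [if_pos rfl, if_neg (by omega), if_pos (le_refl _)]
        simp
      · rw [if_neg (by omega), if_pos (by omega), if_pos (by omega)]
        have : j - i = (j - (i + 1)) + 1 := by omega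
        rw [this]
        simp
    by_cases hi : i < w.length
    · rw [if_pos hi]
      by_cases hf : f.length > w.getD i 0
      · rw [if_pos hf]
        apply key
        · simp; omega
        · intro k
          by_cases hk : k = i
          · subst hk
            rw [if_pos rfl, List.getD_eq_getElem _ _ (by simpa using hi), List.getElem_set_self]
            omega
          · rw [if_neg hk]
            rcases Nat.lt_or_ge k w.length with hkl | hkl
            · rw [List.getD_eq_getElem _ _ (by simpa using hkl),
                List.getD_eq_getElem _ _ hkl, List.getElem_set_ne (by omega)]
            · rw [List.getD_eq_default _ _ (by simpa using hkl), List.getD_eq_default _ _ hkl]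
      · rw [if_neg hf]
        apply key
        · omega
        · intro k
          by_cases hk : k = i
          · subst hk; rw [if_pos rfl]; omega
          · rw [if_neg hk]
    · rw [if_neg hi]
      have hieq : i = w.length := by omega
      apply key
      · simp; omega
      · intro k
        by_cases hk : k = i
        · subst hk
          rw [if_pos rfl, hieq, List.getD_eq_getElem _ _ (by simp),
            List.getElem_append_right (le_refl _)]
          simp
        · rw [if_neg hk]
          rcases Nat.lt_or_ge k w.length with hkl | hkl
          · rw [List.getD_eq_getElem _ _ (by simp; omega), List.getD_eq_getElem _ _ hkl,
              List.getElem_append_left hkl]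
          · rw [List.getD_eq_default _ _ (by simp; omega), List.getD_eq_default _ _ hkl]

-- merge from index 0
lemma mergeRow_zero_length (w : List Nat) (r : List (List Char)) :
    (mergeRow w 0 r).length = max w.length r.length := by
  rw [mergeRow_length r w 0 (Nat.zero_le _)]; omega

lemma mergeRow_zero_getD (w : List Nat) (r : List (List Char)) (j : Nat) :
    (mergeRow w 0 r).getD j 0 = max (w.getD j 0) ((r.getD j []).length) := by
  rw [mergeRow_getD r w 0 (Nat.zero_le _) j]; simp

-- the fold of Source B's outer loop: rows accumulator and final widths
lemma foldB_pair (infile : List String) : ∀ (acc : List (List (List Char))) (w : List Nat),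
    infile.foldl (fun (st : List (List (List Char)) × List Nat) line =>
      let row := PySem.Chars.splitOn (PySem.Chars.strip line.toList) ['$']
      (st.1 ++ [row], mergeRow st.2 0 row)) (acc, w)
    = (acc ++ pvRows infile, (pvRows infile).foldl (fun w' r => mergeRow w' 0 r) w) := by
  induction infile with
  | nil => intro acc w; simp [pvRows]
  | cons line rest ih =>
    intro acc w
    simp only [List.foldl_cons, ih, pvRows, List.map_cons, List.append_assoc,
      List.singleton_append, List.foldl_cons]

lemma foldW_length (rows : List (List (List Char))) : ∀ (w : List Nat),
    (rows.foldl (fun w' r => mergeRow w' 0 r) w).length = (rows.map List.length).foldl max w.length := by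
  induction rows with
  | nil => intro w; rfl
  | cons r rest ih =>
    intro w
    simp only [List.foldl_cons, List.map_cons, ih, mergeRow_zero_length]

lemma foldW_getD (rows : List (List (List Char))) (j : Nat) : ∀ (w : List Nat),
    (rows.foldl (fun w' r => mergeRow w' 0 r) w).getD j 0 =
      (rows.map (fun r => (r.getD j []).length)).foldl max (w.getD j 0) := by
  induction rows with
  | nil => intro w; rfl
  | cons r rest ih =>
    intro w
    simp only [List.foldl_cons, List.map_cons, ih, mergeRow_zero_getD]

lemma row_len_le_pvN {rows : List (List (List Char))} {r : List (List Char)} (hr : r ∈ rows) :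
    r.length ≤ pvN rows :=
  (PySem.List.le_foldl_max (rows.map List.length) 0).2 _ (List.mem_map.mpr ⟨r, hr, rfl⟩)

lemma zip_map_eq_range {α β γ : Type} (l1 : List α) (l2 : List β) (h : l1.length = l2.length)
    (g : α × β → γ) (d1 : α) (d2 : β) :
    (List.zip l1 l2).map g =
      (List.range l2.length).map (fun j => g (l1.getD j d1, l2.getD j d2)) := by
  apply List.ext_getElem
  · simp [h]
  · intro i h1 h2
    have hi2 : i < l2.length := by simpa using h2
    have hi1 : i < l1.length := by omega
    simp only [List.getElem_map, List.getElem_zip, List.getElem_range]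
    rw [List.getD_eq_getElem _ _ hi1, List.getD_eq_getElem _ _ hi2]

lemma alt_eq_norm (infile : List String) (justification : String) :
    aligner_alt infile justification = pvNorm infile justification := by
  unfold aligner_alt pvNorm
  rw [foldB_pair infile [] []]
  simp only [List.nil_append]
  set rows := pvRows infile with hrows
  set W := rows.foldl (fun w' r => mergeRow w' 0 r) [] with hWdef
  have hWlen : W.length = pvN rows := by
    rw [hWdef, foldW_length]; rfl
  have hWget : ∀ j, W.getD j 0 = pvW rows j := by
    intro j; rw [hWdef, foldW_getD]; rfl
  congr 1
  congr 1
  apply List.map_congr_left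
  intro r hr
  rw [join_nil_flatten]
  congr 1
  have hpad : (r ++ List.replicate (W.length - r.length) ([] : List Char)).length = W.length := by
    have := row_len_le_pvN hr
    simp; omega
  rw [zip_map_eq_range _ W hpad _ ([] : List Char) 0, hWlen]
  apply List.map_congr_left
  intro j _
  rw [getD_append_replicate, hWget j]

-- ---- A-side reduction to the normal form ----

lemma a_pipeline (rows : List (List (List Char))) (just : String) (hn : 0 < pvN rows) :
    (let maxfields := rows.foldl (fun m fields => if fields.length > m then fields.length else m) 0
     let fieldsbyrow := rows.map (fun fields =>
       (List.range (maxfields - fields.length)).foldl (fun fs _ => fs ++ [([] : List Char)]) fields)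
     let fieldsbycolumn := (List.range maxfields).foldl (fun acc i =>
       acc ++ [fieldsbyrow.foldl (fun col row => col ++ [row.getD i []]) []]) []
     let colwidths := fieldsbycolumn.foldl (fun acc column =>
       acc ++ [column.foldl (fun m f => if f.length > m then f.length else m) 0]) []
     let justifiedfields := (List.range fieldsbycolumn.length).foldl (fun acc i =>
       acc ++ [(List.range (fieldsbycolumn.getD i []).length).foldl (fun jc j =>
         jc ++ [pyJustify just ((fieldsbycolumn.getD i []).getD j []) (colwidths.getD i 0)]) []]) []
     let justifiedrows := (List.range (justifiedfields.getD 0 []).length).foldl (fun acc i =>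
       acc ++ [(List.range justifiedfields.length).foldl (fun row j =>
         row ++ (justifiedfields.getD j []).getD i [] ++ [' ']) []]) []
     String.ofList (PySem.Chars.join ['\n'] justifiedrows))
    = String.ofList (PySem.Chars.join ['\n'] (rows.map (fun r =>
        ((List.range (pvN rows)).map (fun j =>
          pyJustify just (r.getD j []) (pvW rows j) ++ [' '])).flatten))) := by
  have hmax : rows.foldl (fun m fields => if fields.length > m then fields.length else m) 0 = pvN rows :=
    foldl_ifgt_key _ _ _
  simp only [hmax, PySem.List.foldl_append_singleton_eq_map, List.nil_append, foldl_ifgt_key,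
    map_const_range, List.append_assoc, PySem.List.foldl_append_eq_flatMap,
    List.flatMap_def, List.length_map, List.length_range]
  set n := pvN rows with hnn
  set P := rows.map (fun fields => fields ++ List.replicate (n - fields.length) ([] : List Char)) with hP
  set C := (List.range n).map (fun i => P.map (fun row => row.getD i [])) with hC
  set W := C.map (fun c => List.foldl max 0 (c.map List.length)) with hW
  set JF := (List.range n).map (fun i =>
    (List.range ((C.getD i []).length)).map (fun j =>
      pyJustify just ((C.getD i []).getD j []) (W.getD i 0))) with hJF
  have hCget : ∀ i, i < n → C.getD i [] = rows.map (fun r => r.getD i []) := by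
    intro i hi
    rw [hC, PySem.List.getD_map_range _ _ _ _ hi, hP, List.map_map]
    apply List.map_congr_left
    intro a _
    exact getD_append_replicate a _ i []
  have hClen : ∀ i, i < n → (C.getD i []).length = rows.length := by
    intro i hi; rw [hCget i hi, List.length_map]
  have hWget : ∀ i, i < n → W.getD i 0 = pvW rows i := by
    intro i hi
    have hl : i < C.length := by rw [hC, List.length_map, List.length_range]; exact hi
    rw [hW, getD_map_lt C _ i [] 0 hl, hCget i hi, List.map_map]
    rfl
  have hJFget : ∀ j, j < n → JF.getD j [] =
      rows.map (fun r => pyJustify just (r.getD j []) (pvW rows j)) := by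
    intro j hj
    rw [hJF, PySem.List.getD_map_range _ _ _ _ hj, hClen j hj, hWget j hj, hCget j hj]
    apply List.ext_getElem
    · simp
    · intro t h1 h2
      have ht : t < rows.length := by simpa using h1
      simp only [List.getElem_map, List.getElem_range]
      rw [getD_map_lt rows _ t [] [] ht, List.getD_eq_getElem _ _ ht]
  have hcnt : (JF.getD 0 []).length = rows.length := by
    rw [hJFget 0 hn, List.length_map]
  rw [hcnt, ← map_getD_range rows (fun r =>
    ((List.range n).map (fun j => pyJustify just (r.getD j []) (pvW rows j) ++ [' '])).flatten) []]
  congr 1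
  congr 1
  apply List.map_congr_left
  intro i hi
  rw [List.mem_range] at hi
  congr 1
  apply List.map_congr_left
  intro j hj
  rw [List.mem_range] at hj
  rw [hJFget j hj, getD_map_lt rows _ i [] [] hi]

lemma a_eq_norm (infile : List String) (justification : String) (hne : infile ≠ []) :
    aligner infile justification = pvNorm infile justification := by
  have hn : 0 < pvN (pvRows infile) := by
    obtain ⟨line, rest, rfl⟩ : ∃ l r, infile = l :: r := by
      cases infile with
      | nil => exact absurd rfl hne
      | cons a b => exact ⟨a, b, rfl⟩
    have h1 : PySem.Chars.splitOn (PySem.Chars.strip line.toList) ['$'] ≠ [] := splitOn_ne_nil _ _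
    have h2 : 0 < (PySem.Chars.splitOn (PySem.Chars.strip line.toList) ['$']).length :=
      List.length_pos_iff.mpr h1
    have h3 := (PySem.List.le_foldl_max (((pvRows (line :: rest)).map List.length).tail)
      (max 0 (PySem.Chars.splitOn (PySem.Chars.strip line.toList) ['$']).length)).1
    simp [pvN, pvRows] at h3 ⊢
    omega
  unfold aligner pvNorm
  rw [PySem.List.foldl_append_singleton_eq_map, List.nil_append]
  exact a_pipeline _ justification hn

-- ===== VERDICT (by name: the statement is the Claim_ definition above) =====
theorem aligner_spec : Claim_equal_aligner := by
  intro infile justification _ hpre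
  unfold Spec_aligner
  rw [a_eq_norm infile justification hpre.1, alt_eq_norm]
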